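-- pv_equiv track=rewrite | github.com/denballakh/ranger-tools | modding-tools/dependencies.py | convert_ini_to_dict
-- ===== SOURCE A (Python) =====
-- def convert_ini_to_dict(content: str) -> dict[str, str]:
--     result: dict[str, str] = {}
--     for s in content.split('\n'):
--         if not s:
--             continue
--         if '=' not in s:
--             continue
--         key, val = s.split('=', 1)
--         if key in result:
--             result[key] += '\n' + val
--         else:
--             result[key] = val
--     return result
-- ===== SOURCE B (Python) =====
-- def convert_ini_to_dict(content: str) -> dict[str, str]:
--     pairs = [line.split('=', 1) for line in content.split('\n') if line and '=' in line]
--     order = dict.fromkeys(key for key, _ in pairs)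
--     return {k: '\n'.join(v for key, v in pairs if key == k) for k in order}
-- ===== Notes on version B (the rewrite author's own statement) =====
-- stated objective: alternative
-- what changed: B is a staged group-by: it first extracts the flat list of (key, value) pairs, computes first-appearance key order with dict.fromkeys, and then for each distinct key gathers and joins its values by rescanning the pair list, instead of A's single pass that concatenates into a running per-key string in a dict.
import Mathlib
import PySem

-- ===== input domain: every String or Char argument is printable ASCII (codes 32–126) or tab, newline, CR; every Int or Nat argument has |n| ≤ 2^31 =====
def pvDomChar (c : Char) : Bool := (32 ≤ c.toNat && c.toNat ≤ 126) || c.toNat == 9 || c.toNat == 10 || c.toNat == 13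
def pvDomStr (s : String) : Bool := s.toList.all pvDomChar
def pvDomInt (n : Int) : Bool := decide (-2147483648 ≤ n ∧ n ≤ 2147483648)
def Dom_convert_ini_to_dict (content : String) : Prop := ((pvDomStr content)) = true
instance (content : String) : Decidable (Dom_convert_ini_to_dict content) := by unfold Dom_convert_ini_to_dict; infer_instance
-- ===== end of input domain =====

-- B is a staged group-by (extract flat pair list, compute key order, gather per key by
-- rescanning) instead of A's single pass concatenating into a running per-key string.

-- ===== PORT A =====
def convert_ini_to_dict (content : String) : List (String × String) :=
  let result := (PySem.Chars.splitOn content.toList ['\n']).foldl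
    (fun (result : PySem.Dict (List Char) (List Char)) s =>
      if s = [] then result
      else if s.contains '=' = false then result
      else
        match PySem.Chars.splitOnMax s ['='] 1 with
        | [key, val] =>
          if result.contains key then
            result.insert key (result.getD key [] ++ ['\n'] ++ val)
          else
            result.insert key val
        | _ => result)
    PySem.Dict.empty
  result.items.map (fun p => (String.ofList p.1, String.ofList p.2))

-- ===== PORT B =====
-- the list comprehension extracting the (key, value) pairs of the kept lines
def pvExtractLine (s : List Char) : Option (List Char × List Char) :=
  if s = [] then none
  else if s.contains '=' = false then none
  else
    match PySem.Chars.splitOnMax s ['='] 1 with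
    | [] => none
    | [_] => none
    | [key, val] => some (key, val)
    | _ :: _ :: _ :: _ => none

def convert_ini_to_dict_alt (content : String) : List (String × String) :=
  let pairs := (PySem.Chars.splitOn content.toList ['\n']).filterMap pvExtractLine
  -- dict.fromkeys(key for key, _ in pairs): first-appearance order of the keys
  let order := pairs.foldl
    (fun (d : PySem.Dict (List Char) Unit) p => d.insert p.1 ()) PySem.Dict.empty
  order.keys.map (fun k =>
    (String.ofList k,
     String.ofList (PySem.Chars.join ['\n'] ((pairs.filter (fun p => p.1 == k)).map Prod.snd))))

-- ===== PRECONDITION & SPEC =====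
def Spec_convert_ini_to_dict (content : String) (out : List (String × String)) : Prop := out = convert_ini_to_dict_alt content
instance (content : String) (out : List (String × String)) : Decidable (Spec_convert_ini_to_dict content out) := by unfold Spec_convert_ini_to_dict; infer_instance

-- ===== CLAIM (what is proved, stated in full; the proofs are below) =====
def Claim_equal_convert_ini_to_dict : Prop := ∀ (content : String), Dom_convert_ini_to_dict content → Spec_convert_ini_to_dict content (convert_ini_to_dict content)

-- ===== LEMMAS AND PROOFS =====

-- A's loop body, as a named function (definitionally the lambda inside A's port)
def pvStepA (result : PySem.Dict (List Char) (List Char)) (s : List Char) :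
    PySem.Dict (List Char) (List Char) :=
  if s = [] then result
  else if s.contains '=' = false then result
  else
    match PySem.Chars.splitOnMax s ['='] 1 with
    | [key, val] =>
      if result.contains key then
        result.insert key (result.getD key [] ++ ['\n'] ++ val)
      else
        result.insert key val
    | _ => result

-- proof-side intermediate: the same loop keeping a LIST of fragments per key
def pvStepB (groups : PySem.Dict (List Char) (List (List Char))) (s : List Char) :
    PySem.Dict (List Char) (List (List Char)) :=
  match pvExtractLine s with
  | none => groups
  | some (key, val) => groups.modify key [] (fun vs => vs ++ [val])

def pvJoinPair (p : List Char × List (List Char)) : List Char × List Char :=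
  (p.1, PySem.Chars.join ['\n'] p.2)

lemma pv_join_append (vs : List (List Char)) (v : List Char) (h : vs ≠ []) :
    PySem.Chars.join ['\n'] (vs ++ [v]) = PySem.Chars.join ['\n'] vs ++ ['\n'] ++ v := by
  induction vs with
  | nil => simp at h
  | cons a t ih =>
    cases t with
    | nil => simp [PySem.Chars.join, List.intercalate]
    | cons b t' =>
      have := ih (by simp)
      simp only [PySem.Chars.join, List.intercalate, List.cons_append, List.intersperse,
        List.flatten_cons] at this ⊢
      simp [this]

-- the loop invariant: A's dict is the fragment dict with every list joined by '\n'
lemma pv_inv (lines : List (List Char)) (dA : PySem.Dict (List Char) (List Char))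
    (dB : PySem.Dict (List Char) (List (List Char)))
    (h : dA.items = dB.items.map pvJoinPair) (hnd : dB.keys.Nodup)
    (hne : ∀ p ∈ dB.items, p.2 ≠ []) :
    (lines.foldl pvStepA dA).items = ((lines.foldl pvStepB dB).items).map pvJoinPair := by
  induction lines generalizing dA dB with
  | nil => simpa using h
  | cons s t ih =>
    simp only [List.foldl_cons]
    have keysEq : dA.keys = dB.keys := by
      simp only [PySem.Dict.keys, h, List.map_map]
      rfl
    have hndA : dA.keys.Nodup := keysEq ▸ hnd
    by_cases hs : s = []
    · simp only [pvStepA, pvStepB, pvExtractLine, hs]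
      exact ih dA dB h hnd hne
    · by_cases he : s.contains '=' = false
      · simp only [pvStepA, pvStepB, pvExtractLine, if_neg hs, he]
        exact ih dA dB h hnd hne
      · simp only [pvStepA, pvStepB, pvExtractLine, if_neg hs, if_neg he]
        rcases hsp : PySem.Chars.splitOnMax s ['='] 1 with _ | ⟨key, _ | ⟨val, _ | _⟩⟩ <;>
          try exact ih dA dB h hnd hne
        dsimp only []
        have containsEq : dA.contains key = dB.contains key := by
          rw [PySem.Dict.contains_eq_decide_mem_keys, PySem.Dict.contains_eq_decide_mem_keys,
            keysEq]
        by_cases hc : dB.contains key = true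
        · rw [containsEq, if_pos hc]
          have hmemk : key ∈ dB.keys := (PySem.Dict.contains_iff_mem_keys dB key).1 hc
          obtain ⟨p, hp, hp1⟩ : ∃ p ∈ dB.items, p.1 = key := by
            simpa [PySem.Dict.keys] using hmemk
          obtain ⟨vs, rfl⟩ : ∃ vs, p = (key, vs) := ⟨p.2, by rw [← hp1]⟩
          have hvs : vs ≠ [] := hne _ hp
          have hgB : dB.getD key [] = vs := PySem.Dict.getD_of_mem_items dB hp hnd []
          have hmemA : (key, PySem.Chars.join ['\n'] vs) ∈ dA.items := by
            rw [h]
            exact List.mem_map.2 ⟨(key, vs), hp, rfl⟩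
          have hgA : dA.getD key [] = PySem.Chars.join ['\n'] vs :=
            PySem.Dict.getD_of_mem_items dA hmemA hndA []
          have hmod : dB.modify key [] (fun vs => vs ++ [val]) = dB.insert key (vs ++ [val]) := by
            simp [PySem.Dict.modify, hgB]
          rw [hmod]
          apply ih
          · rw [PySem.Dict.items_insert_of_contains dA _ (containsEq ▸ hc),
              PySem.Dict.items_insert_of_contains dB _ hc, h, List.map_map, List.map_map]
            apply List.map_congr_left
            intro q _
            by_cases hq : q.1 = key
            · simp [Function.comp, pvJoinPair, hq, hgA, pv_join_append vs val hvs]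
            · simp [Function.comp, pvJoinPair, hq]
          · exact PySem.Dict.nodup_keys_insert _ _ _ hnd
          · intro q hq
            rcases (PySem.Dict.mem_items_insert _ _ _ _).1 hq with rfl | ⟨hq', _⟩
            · simp
            · exact hne _ hq'
        · rw [containsEq, if_neg hc]
          have hcf : dB.contains key = false := by simpa using hc
          have hcfA : dA.contains key = false := by rw [containsEq]; exact hcf
          have hmod : dB.modify key [] (fun vs => vs ++ [val]) = dB.insert key [val] := by
            simp [PySem.Dict.modify, PySem.Dict.getD_of_not_contains dB [] hcf]
          rw [hmod]
          apply ih
          · rw [PySem.Dict.items_insert_of_not_contains dA val hcfA,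
              PySem.Dict.items_insert_of_not_contains dB [val] hcf, h, List.map_append]
            simp [pvJoinPair]
          · exact PySem.Dict.nodup_keys_insert _ _ _ hnd
          · intro q hq
            rcases (PySem.Dict.mem_items_insert _ _ _ _).1 hq with rfl | ⟨hq', _⟩
            · simp
            · exact hne _ hq'

-- the line-level fragment loop is the pair-level modify loop over the extracted pairs
lemma pv_lineFold_eq_pairFold (lines : List (List Char))
    (d : PySem.Dict (List Char) (List (List Char))) :
    lines.foldl pvStepB d =
      (lines.filterMap pvExtractLine).foldl
        (fun d p => d.modify p.1 [] (fun vs => vs ++ [p.2])) d := by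
  induction lines generalizing d with
  | nil => rfl
  | cons s t ih =>
    simp only [List.foldl_cons, List.filterMap_cons, pvStepB]
    cases h : pvExtractLine s with
    | none => simpa [h] using ih d
    | some p => cases p; simpa [h] using ih _

-- the fragment dict's items, computed directly from the pair list
lemma pv_groups_items (ps : List (List Char × List Char)) :
    ((ps.foldl (fun d p => d.modify p.1 [] (fun vs => vs ++ [p.2]))
        (PySem.Dict.empty : PySem.Dict (List Char) (List (List Char)))).items) =
      ((ps.foldl (fun (d : PySem.Dict (List Char) Unit) p => d.insert p.1 ())
          PySem.Dict.empty).keys).map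
        (fun k => (k, (ps.filter (fun p => p.1 == k)).map Prod.snd)) := by
  have hnd : (ps.foldl (fun d p => d.modify p.1 [] (fun vs => vs ++ [p.2]))
      (PySem.Dict.empty : PySem.Dict (List Char) (List (List Char)))).keys.Nodup :=
    PySem.Dict.nodup_keys_foldl_modify_key ps Prod.fst [] _ _ PySem.Dict.nodup_keys_empty
  rw [PySem.Dict.items_eq_map_keys _ hnd []]
  have hkeys : (ps.foldl (fun d p => d.modify p.1 [] (fun vs => vs ++ [p.2]))
      (PySem.Dict.empty : PySem.Dict (List Char) (List (List Char)))).keys =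
      (ps.foldl (fun (d : PySem.Dict (List Char) Unit) p => d.insert p.1 ())
        PySem.Dict.empty).keys := by
    rw [PySem.Dict.keys_foldl_modify_key ps Prod.fst [] _ _,
      PySem.Dict.keys_foldl_insert_key ps Prod.fst _ _]
    rfl
  rw [hkeys]
  apply List.map_congr_left
  intro k _
  rw [PySem.Dict.getD_foldl_modify_append]
  simp [PySem.Dict.getD_empty]

-- ===== VERDICT (by name: the statement is the Claim_ definition above) =====
theorem convert_ini_to_dict_spec : Claim_equal_convert_ini_to_dict := by
  unfold Claim_equal_convert_ini_to_dict
  intro content _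
  unfold Spec_convert_ini_to_dict convert_ini_to_dict convert_ini_to_dict_alt
  have hinv := pv_inv (PySem.Chars.splitOn content.toList ['\n'])
    PySem.Dict.empty PySem.Dict.empty (by rfl) (by simp)
    (by intro p hp; simp [PySem.Dict.empty] at hp)
  show ((PySem.Chars.splitOn content.toList ['\n']).foldl pvStepA PySem.Dict.empty).items.map
      (fun p => (String.ofList p.1, String.ofList p.2)) = _
  rw [hinv, pv_lineFold_eq_pairFold, pv_groups_items, List.map_map, List.map_map]
  rfl
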